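-- pv_equiv track=rewrite | github.com/jrached/6.009 | lab7/lab.py | find_all_possible_replacements
-- ===== SOURCE A (Python) =====
-- def find_all_possible_replacements(word):
--     if len(word) == 0:
--         yield ''
--         return
--
--     first, rest = word[0], word[1:]
--     for w in find_all_possible_replacements(rest):
--         yield w
--         yield from (w[:ix] + first + w[ix:] for ix in range(len(w) +1))
-- ===== SOURCE B (Python) =====
-- def find_all_possible_replacements(word):
--     results = ['']
--     for ch in reversed(word):
--         new = []
--         for w in results:
--             new.append(w)
--             for ix in range(len(w) + 1):
--                 new.append(w[:ix] + ch + w[ix:])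
--         results = new
--     yield from results
-- ===== Notes on version B (the rewrite author's own statement) =====
-- stated objective: alternative
-- what changed: Replaced the recursive generator with an iterative bottom-up build: start from [''] and fold over the characters right-to-left, expanding the result list in place with explicit appends instead of recursion and nested generator expressions.
import Mathlib
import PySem

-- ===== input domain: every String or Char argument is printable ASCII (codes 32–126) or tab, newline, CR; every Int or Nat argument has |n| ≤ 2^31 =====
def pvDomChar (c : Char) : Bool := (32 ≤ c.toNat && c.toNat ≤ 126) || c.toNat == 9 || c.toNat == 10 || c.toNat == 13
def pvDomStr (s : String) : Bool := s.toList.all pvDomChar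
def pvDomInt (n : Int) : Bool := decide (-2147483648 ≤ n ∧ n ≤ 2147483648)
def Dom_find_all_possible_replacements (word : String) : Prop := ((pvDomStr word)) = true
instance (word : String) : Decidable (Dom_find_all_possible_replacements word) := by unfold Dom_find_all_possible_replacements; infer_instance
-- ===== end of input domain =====

-- B replaces A's recursive generator by an iterative right-to-left fold building the same list; objective: alternative (no asymptotic change).

-- ===== PORT A =====
-- A's recursion over the word; strings are carried as List Char and packed to String at the end.
-- w[:ix] + first + w[ix:] with 0 ≤ ix ≤ len(w) is exactly take/drop (in-range slice).
def farA : List Char → List (List Char)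
  | [] => [[]]
  | first :: rest =>
      (farA rest).flatMap (fun w =>
        w :: (List.range (w.length + 1)).map (fun ix => w.take ix ++ first :: w.drop ix))

def find_all_possible_replacements (word : String) : List String :=
  (farA word.toList).map (fun l => String.ofList l)

-- ===== PORT B =====
-- one pass of B's inner loop: for w in results: new.append(w); for ix …: new.append(…)
def farBstep (results : List (List Char)) (ch : Char) : List (List Char) :=
  results.foldl (fun new w =>
    (List.range (w.length + 1)).foldl
      (fun acc ix => acc ++ [w.take ix ++ ch :: w.drop ix]) (new ++ [w])) []

def find_all_possible_replacements_alt (word : String) : List String :=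
  (word.toList.reverse.foldl farBstep [[]]).map (fun l => String.ofList l)

-- ===== PRECONDITION & SPEC =====
def Spec_find_all_possible_replacements (word : String) (out : List String) : Prop := out = find_all_possible_replacements_alt word
instance (word : String) (out : List String) : Decidable (Spec_find_all_possible_replacements word out) := by unfold Spec_find_all_possible_replacements; infer_instance

-- ===== CLAIM (what is proved, stated in full; the proofs are below) =====
def Claim_equal_find_all_possible_replacements : Prop := ∀ (word : String), Dom_find_all_possible_replacements word → Spec_find_all_possible_replacements word (find_all_possible_replacements word)

-- ===== LEMMAS AND PROOFS =====

-- one B step equals one unfolding of A's recursion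
theorem farBstep_eq (r : List (List Char)) (ch : Char) :
    farBstep r ch = r.flatMap (fun w =>
      w :: (List.range (w.length + 1)).map (fun ix => w.take ix ++ ch :: w.drop ix)) := by
  unfold farBstep
  rw [PySem.List.foldl_congr_mem r _
        (fun new w => new ++
          (w :: (List.range (w.length + 1)).map (fun ix => w.take ix ++ ch :: w.drop ix))) []
        (by intro acc w _; rw [PySem.List.foldl_append_singleton_eq_map]; simp),
      PySem.List.foldl_append_eq_flatMap]
  simp

theorem farB_rev_eq (l : List Char) :
    l.reverse.foldl farBstep [[]] = farA l := by
  induction l with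
  | nil => rfl
  | cons c rest ih =>
      simp only [List.reverse_cons, List.foldl_append, List.foldl_cons, List.foldl_nil, ih]
      rw [farBstep_eq]
      rfl

-- ===== VERDICT (by name: the statement is the Claim_ definition above) =====
theorem find_all_possible_replacements_spec : Claim_equal_find_all_possible_replacements := by
  intro word _
  unfold Spec_find_all_possible_replacements find_all_possible_replacements find_all_possible_replacements_alt
  rw [farB_rev_eq]
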